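-- pv_equiv track=rewrite | github.com/2024-pass-backend/algorithm | Week2/공통/명예의전당_1/yubin.py | solution
-- ===== SOURCE A (Python) =====
-- def solution(k, score):
--     answer = []
--     k_score = []
--     for s in score:
--         if len(k_score)<k:
--             k_score.append(s)
--             k_score = sorted(k_score)
--         else:
--             if s > k_score[0]:
--                 k_score[0] = s
--                 k_score = sorted(k_score)
--         answer.append(k_score[0])
--     return answer
-- ===== SOURCE B (Python) =====
-- def solution(k, score):
--     # One sorted list of every score seen so far (binary-search insertion);
--     # the day's answer is read off by index arithmetic: the min(k, days)-th
--     # largest element.  No top-k buffer, no sorting.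
--     seen = []
--     answer = []
--     for s in score:
--         lo, hi = 0, len(seen)
--         while lo < hi:
--             mid = (lo + hi) // 2
--             if seen[mid] <= s:
--                 lo = mid + 1
--             else:
--                 hi = mid
--         seen.insert(lo, s)
--         answer.append(seen[-min(k, len(seen))])
--     return answer
-- ===== Notes on version B (the rewrite author's own statement) =====
-- stated objective: alternative
-- what changed: A keeps a top-k buffer that it re-sorts with sorted() on every change; B keeps no buffer at all: it maintains one ascending list of every score seen (hand-written binary-search insertion, C-level list.insert, no sorting) and reads each day's answer off by index arithmetic as the min(k, days)-th largest element.
-- outside the precondition, e.g. on solution(0, [3, 1]): A raises IndexError, B returns [3, 1]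
import Mathlib
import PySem

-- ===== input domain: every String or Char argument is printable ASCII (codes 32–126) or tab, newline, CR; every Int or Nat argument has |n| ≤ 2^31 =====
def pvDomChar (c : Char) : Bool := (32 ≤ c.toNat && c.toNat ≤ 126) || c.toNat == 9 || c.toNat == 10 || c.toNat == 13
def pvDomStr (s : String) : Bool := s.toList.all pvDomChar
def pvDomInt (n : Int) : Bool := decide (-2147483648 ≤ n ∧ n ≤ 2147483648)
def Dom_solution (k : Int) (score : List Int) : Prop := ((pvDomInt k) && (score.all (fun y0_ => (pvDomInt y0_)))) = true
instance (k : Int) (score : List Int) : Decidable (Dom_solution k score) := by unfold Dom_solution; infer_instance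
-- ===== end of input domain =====

-- B replaces A's re-sorted top-k buffer by ONE sorted list of all scores seen
-- (binary-search insertion), reading each day's answer by index arithmetic
-- (objective: alternative algorithm; measurably faster when k is large).

-- ===== PORT A =====
-- one step of A's loop body: state is (answer, k_score)
def solutionStep (k : Int) (st : List Int × List Int) (s : Int) : List Int × List Int :=
  let ks := st.2
  let ks' :=
    if (ks.length : Int) < k then
      PySem.List.sorted (ks ++ [s]) (fun x => x) false
    else if s > PySem.List.pyGetD ks 0 0 then
      PySem.List.sorted (PySem.List.pySetD ks 0 s) (fun x => x) false
    else ks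
  (st.1 ++ [PySem.List.pyGetD ks' 0 0], ks')

def solution (k : Int) (score : List Int) : List Int :=
  (score.foldl (solutionStep k) ([], [])).1

-- ===== PORT B =====
-- Source B's hand-written binary search: while lo < hi: mid = (lo+hi)//2; …
def bsLoop (seen : List Int) (s : Int) (lo hi : Int) : Int :=
  if h : lo < hi then
    let mid := PySem.Int.floordiv (lo + hi) 2
    if PySem.List.pyGetD seen mid 0 ≤ s then bsLoop seen s (mid + 1) hi
    else bsLoop seen s lo mid
  else lo
termination_by (hi - lo).toNat
decreasing_by
  · have := PySem.Int.floordiv_two_mid_bounds (lo := lo) (hi := hi) (le_of_lt h)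
    omega
  · have h2 : PySem.Int.floordiv (lo + hi) 2 < hi := by
      rw [PySem.Int.floordiv_lt_iff_lt_mul (by omega)]
      omega
    omega

-- one step of B's loop body: state is (answer, seen)
def solutionAltStep (k : Int) (st : List Int × List Int) (s : Int) : List Int × List Int :=
  let seen := st.2
  let lo := bsLoop seen s 0 (seen.length : Int)
  let seen' := PySem.List.insert seen lo s
  (st.1 ++ [PySem.List.pyGetD seen' (-(min k (seen'.length : Int))) 0], seen')

def solution_alt (k : Int) (score : List Int) : List Int :=
  (score.foldl (solutionAltStep k) ([], [])).1

-- ===== PRECONDITION & SPEC =====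
-- A raises IndexError (k_score[0] on the empty buffer) when k ≤ 0 and score is
-- nonempty; exactly those inputs are excluded, nothing else.
def Pre_solution (k : Int) (score : List Int) : Prop := 1 ≤ k ∨ score = []
instance (k : Int) (score : List Int) : Decidable (Pre_solution k score) := by unfold Pre_solution; infer_instance

def pvWitness_solution : Int × List Int := (2, [5, 1, 4, 4, 3])

def Spec_solution (k : Int) (score : List Int) (out : List Int) : Prop := out = solution_alt k score
instance (k : Int) (score : List Int) (out : List Int) : Decidable (Spec_solution k score out) := by unfold Spec_solution; infer_instance

-- ===== CLAIM (what is proved, stated in full; the proofs are below) =====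
def Claim_equal_solution : Prop := ∀ (k : Int) (score : List Int), Dom_solution k score → Pre_solution k score → Spec_solution k score (solution k score)

-- ===== LEMMAS AND PROOFS =====

-- ordered insert (after equal elements), the effect of Source B's binary insertion
def ins (s : Int) : List Int → List Int
  | [] => [s]
  | a :: t => if a ≤ s then a :: ins s t else s :: a :: t

theorem length_ins (s : Int) (l : List Int) : (ins s l).length = l.length + 1 := by
  induction l with
  | nil => rfl
  | cons a t ih => simp only [ins]; split <;> simp [ih]

theorem perm_ins (s : Int) (l : List Int) : (ins s l).Perm (s :: l) := by
  induction l with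
  | nil => rfl
  | cons a t ih =>
    simp only [ins]; split
    · exact ((ih.cons a).trans (List.Perm.swap s a t)).symm.symm
    · rfl

theorem pairwise_ins (s : Int) (l : List Int) (hl : l.Pairwise (· ≤ ·)) :
    (ins s l).Pairwise (· ≤ ·) := by
  induction l with
  | nil => simp [ins]
  | cons a t ih =>
    rcases List.pairwise_cons.mp hl with ⟨ha, ht⟩
    simp only [ins]; split
    · refine List.pairwise_cons.mpr ⟨?_, ih ht⟩
      intro b hb
      rcases List.mem_cons.mp ((perm_ins s t).mem_iff.mp hb) with hc | hc
      · omega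
      · exact ha _ hc
    · refine List.pairwise_cons.mpr ⟨?_, hl⟩
      intro b hb; rcases List.mem_cons.mp hb with hc | hc
      · omega
      · exact le_trans (by omega) (ha _ hc)

-- ins is takeWhile/dropWhile around s
theorem ins_eq_takeWhile (s : Int) (l : List Int) :
    ins s l = l.takeWhile (fun a => decide (a ≤ s)) ++ s :: l.dropWhile (fun a => decide (a ≤ s)) := by
  induction l with
  | nil => rfl
  | cons a t ih =>
    simp only [ins, List.takeWhile_cons, List.dropWhile_cons]
    by_cases hc : a ≤ s <;> simp [hc, ih]

theorem take_twl (p : Int → Bool) (l : List Int) :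
    l.take (l.takeWhile p).length = l.takeWhile p := by
  induction l with
  | nil => rfl
  | cons a t ih =>
    simp only [List.takeWhile_cons]
    cases h : p a <;> simp [ih]

theorem drop_twl (p : Int → Bool) (l : List Int) :
    l.drop (l.takeWhile p).length = l.dropWhile p := by
  induction l with
  | nil => rfl
  | cons a t ih =>
    simp only [List.takeWhile_cons, List.dropWhile_cons]
    cases h : p a <;> simp [ih]

theorem twl_le (p : Int → Bool) (l : List Int) : (l.takeWhile p).length ≤ l.length := by
  induction l with
  | nil => simp
  | cons a t ih =>
    simp only [List.takeWhile_cons]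
    cases h : p a <;> simp [ih]

theorem getElem_lt_twl (p : Int → Bool) (l : List Int) (i : Nat)
    (h : i < (l.takeWhile p).length) (h2 : i < l.length) : p l[i] = true := by
  induction l generalizing i with
  | nil => simp at h2
  | cons a t ih =>
    cases hp : p a
    · simp [hp] at h
    · cases i with
      | zero => simpa using hp
      | succ j =>
        simp only [List.takeWhile_cons, hp] at h
        simpa using ih j (by simpa using h) (by simpa using h2)

theorem not_p_twl (p : Int → Bool) (l : List Int)
    (h : (l.takeWhile p).length < l.length) : p (l[(l.takeWhile p).length]'h) = false := by
  induction l with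
  | nil => simp at h
  | cons a t ih =>
    cases hp : p a
    · simp [hp]
    · simp only [List.takeWhile_cons, hp, if_pos]
      have h' : (t.takeWhile p).length < t.length := by
        simpa [hp] using h
      simpa using ih h'

-- index characterization on a sorted list: l[i] ≤ s ↔ i < |takeWhile (≤ s)|
theorem sorted_le_iff (s : Int) (l : List Int) (hl : l.Pairwise (· ≤ ·))
    (i : Nat) (hi : i < l.length) :
    l[i] ≤ s ↔ i < (l.takeWhile (fun a => decide (a ≤ s))).length := by
  constructor
  · intro h
    by_contra hcon
    rw [not_lt] at hcon
    have hlt : (l.takeWhile (fun a => decide (a ≤ s))).length < l.length := lt_of_le_of_lt hcon hi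
    have hnp := not_p_twl (fun a => decide (a ≤ s)) l hlt
    simp only [decide_eq_false_iff_not, not_le] at hnp
    rcases lt_or_eq_of_le hcon with hlt2 | heq
    · have := (List.pairwise_iff_getElem.mp hl) _ _ hlt hi hlt2
      omega
    · exact absurd h (by simp only [heq] at hnp; exact not_le.mpr hnp)
  · intro h
    have := getElem_lt_twl (fun a => decide (a ≤ s)) l i h hi
    simpa using this

-- binary search returns the insertion point |takeWhile (≤ s)|
theorem bsLoop_eq (seen : List Int) (s : Int) (hs : seen.Pairwise (· ≤ ·)) :
    ∀ (d : Nat) (lo hi : Int), (hi - lo).toNat = d → 0 ≤ lo → hi ≤ (seen.length : Int) →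
    lo ≤ ((seen.takeWhile (fun a => decide (a ≤ s))).length : Int) →
    ((seen.takeWhile (fun a => decide (a ≤ s))).length : Int) ≤ hi →
    bsLoop seen s lo hi = ((seen.takeWhile (fun a => decide (a ≤ s))).length : Int) := by
  intro d
  induction d using Nat.strong_induction_on with
  | _ d ih =>
    intro lo hi hd h0 hhi hlo htw
    rw [bsLoop]
    by_cases h : lo < hi
    · simp only [h, dif_pos]
      have hmb := PySem.Int.floordiv_two_mid_bounds (lo := lo) (hi := hi) (le_of_lt h)
      have hmlt : PySem.Int.floordiv (lo + hi) 2 < hi := by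
        rw [PySem.Int.floordiv_lt_iff_lt_mul (by omega)]; omega
      set mid := PySem.Int.floordiv (lo + hi) 2 with hmid
      have hmn : 0 ≤ mid := by omega
      have hml : mid < (seen.length : Int) := by omega
      rw [PySem.List.pyGetD_eq_getElem seen 0 hmn hml]
      have hchar := sorted_le_iff s seen hs mid.toNat (by omega)
      by_cases hc : seen[mid.toNat]'(by omega) ≤ s
      · simp only [hc, if_pos]
        have : mid.toNat < (seen.takeWhile (fun a => decide (a ≤ s))).length := hchar.mp hc
        exact ih (hi - (mid + 1)).toNat (by omega) (mid + 1) hi (by omega) (by omega) hhi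
          (by omega) htw
      · simp only [hc, if_neg, not_false_iff]
        have : ¬ mid.toNat < (seen.takeWhile (fun a => decide (a ≤ s))).length := fun hh => hc (hchar.mpr hh)
        exact ih (mid - lo).toNat (by omega) lo mid (by omega) h0 (by omega) hlo (by omega)
    · simp only [h, dif_neg, not_false_iff]
      omega

-- Source B's binary insertion IS the ordered insert
theorem insert_bs (seen : List Int) (s : Int) (hs : seen.Pairwise (· ≤ ·)) :
    PySem.List.insert seen (bsLoop seen s 0 (seen.length : Int)) s = ins s seen := by
  have hb := bsLoop_eq seen s hs ((seen.length : Int) - 0).toNat 0 (seen.length : Int) rfl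
    (le_refl 0) (le_refl _) (by positivity) (by exact_mod_cast twl_le _ seen)
  rw [hb, PySem.List.insert_natCast seen _ s (twl_le _ seen), take_twl, drop_twl,
    ins_eq_takeWhile]

-- A's re-sorts are ordered inserts on an already sorted buffer
theorem sortedA_append (s : Int) (l : List Int) (hl : l.Pairwise (· ≤ ·)) :
    PySem.List.sorted (l ++ [s]) (fun x => x) false = ins s l := by
  exact PySem.List.sorted_id_eq_of_perm_of_pairwise _ _
    ((perm_ins s l).trans (List.perm_append_singleton s l).symm) (pairwise_ins s l hl)

theorem sortedA_cons (s : Int) (l : List Int) (hl : l.Pairwise (· ≤ ·)) :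
    PySem.List.sorted (s :: l) (fun x => x) false = ins s l := by
  exact PySem.List.sorted_id_eq_of_perm_of_pairwise _ _ (perm_ins s l) (pairwise_ins s l hl)

theorem ins_all_le (s : Int) (l : List Int) (h : ∀ x ∈ l, s ≤ x) : ins s l = s :: l := by
  induction l with
  | nil => rfl
  | cons a t ih =>
    simp only [ins]
    by_cases hc : a ≤ s
    · have ha : a = s := le_antisymm hc (h a (List.mem_cons_self))
      rw [if_pos hc, ih (fun x hx => h x (List.mem_cons_of_mem a hx)), ha]
    · rw [if_neg hc]

theorem ins_drop_le (s : Int) (l : List Int) (hl : l.Pairwise (· ≤ ·)) (m : Nat)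
    (hm : m < l.length) (h : s ≤ l[m]) : (ins s l).drop (m + 1) = l.drop m := by
  induction l generalizing m with
  | nil => simp at hm
  | cons a t ih =>
    rcases List.pairwise_cons.mp hl with ⟨ha, ht⟩
    cases m with
    | zero =>
      simp only [List.getElem_cons_zero] at h
      simp only [ins]
      by_cases hc : a ≤ s
      · have has : a = s := le_antisymm hc h
        rw [if_pos hc]
        simp only [List.drop_succ_cons, List.drop_zero]
        rw [ins_all_le s t (fun x hx => has ▸ ha x hx)]
        rw [has]
      · rw [if_neg hc]; simp
    | succ j =>
      simp only [List.getElem_cons_succ] at h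
      simp only [ins]
      by_cases hc : a ≤ s
      · rw [if_pos hc]
        simp only [List.drop_succ_cons]
        exact ih ht j (by simpa using hm) h
      · rw [if_neg hc]; simp

theorem ins_drop_gt (s : Int) (l : List Int) (hl : l.Pairwise (· ≤ ·)) (m : Nat)
    (hm : m < l.length) (h : l[m] < s) : (ins s l).drop (m + 1) = ins s (l.drop (m + 1)) := by
  induction l generalizing m with
  | nil => simp at hm
  | cons a t ih =>
    rcases List.pairwise_cons.mp hl with ⟨ha, ht⟩
    cases m with
    | zero =>
      simp only [List.getElem_cons_zero] at h
      simp only [ins, if_pos (le_of_lt h)]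
      simp
    | succ j =>
      simp only [List.getElem_cons_succ] at h
      have hjt : j < t.length := by simpa using hm
      have hc : a ≤ s := le_of_lt (lt_of_le_of_lt (ha _ (List.getElem_mem hjt)) h)
      simp only [ins, if_pos hc, List.drop_succ_cons]
      exact ih ht j hjt h

-- the loop invariant: A's buffer is the top-min(k,·) suffix of B's sorted list
theorem loop_eq (k : Int) (hk : 1 ≤ k) :
    ∀ (score ans ks seen : List Int),
      seen.Pairwise (· ≤ ·) →
      ks = seen.drop (seen.length - k.toNat) →
      (score.foldl (solutionStep k) (ans, ks)).1 =
      (score.foldl (solutionAltStep k) (ans, seen)).1 := by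
  intro score
  induction score with
  | nil => intro ans ks seen _ _; rfl
  | cons s rest ih =>
    intro ans ks seen hs hks
    set K := k.toNat with hK
    set n := seen.length with hn
    have hK1 : 1 ≤ K := by omega
    -- B's new sorted list
    have hins : PySem.List.insert seen (bsLoop seen s 0 (seen.length : Int)) s = ins s seen :=
      insert_bs seen s hs
    have hlen' : (ins s seen).length = n + 1 := by rw [length_ins, hn]
    have hs' : (ins s seen).Pairwise (· ≤ ·) := pairwise_ins s seen hs
    -- B's appended element is (ins s seen)[(n+1) - K]
    have hidxlt : n + 1 - K < n + 1 := by omega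
    have heB : PySem.List.pyGetD (ins s seen)
        (-(min k (((ins s seen).length : Nat) : Int))) 0 = (ins s seen)[n + 1 - K]'(by omega) := by
      have hmin : min k (((ins s seen).length : Nat) : Int) =
          (((min k (((n : Nat) : Int) + 1)).toNat : Nat) : Int) := by rw [hlen']; push_cast; omega
      rw [hmin, PySem.List.pyGetD_neg_natCast (ins s seen) _ 0 (by omega) (by rw [hlen']; omega)]
      simp only [hlen']
      simp only [show n + 1 - (min k (((n : Nat) : Int) + 1)).toNat = n + 1 - K from by omega]
    -- case split on A's branch
    have hkslen : ks.length = n - (n - K) := by rw [hks, List.length_drop]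
    by_cases hbr : n < K
    · -- buffer not yet full: ks = seen
      have hks0 : n - K = 0 := by omega
      have hkseq : ks = seen := by rw [hks, hks0, List.drop_zero]
      have hcond : ((ks.length : Nat) : Int) < k := by
        rw [hkseq, ← hn]; omega
      have hksA : PySem.List.sorted (ks ++ [s]) (fun x => x) false = ins s seen := by
        rw [hkseq]; exact sortedA_append s seen hs
      simp only [List.foldl_cons, solutionStep, solutionAltStep, if_pos hcond, hins, hksA]
      have hEA : PySem.List.pyGetD (ins s seen) 0 0 =
          PySem.List.pyGetD (ins s seen) (-(min k (((ins s seen).length : Nat) : Int))) 0 := by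
        rw [heB]
        have h0 : n + 1 - K = 0 := by omega
        rw [PySem.List.pyGetD_zero, List.getD_eq_getElem _ _ (by omega)]
        simp only [h0]
      rw [hEA]
      exact ih _ _ _ hs' (by simp [hlen', show n + 1 - K = 0 from by omega])
    · -- buffer full: ks has length K, head seen[n-K]
      have hnK : K ≤ n := by omega
      have hklen : ks.length = K := by omega
      have hcond : ¬ ((ks.length : Nat) : Int) < k := by rw [hklen]; omega
      have hmlt : n - K < n := by omega
      have hhead : ks = seen[n - K]'(by omega) :: seen.drop (n - K + 1) := by
        rw [hks, List.drop_eq_getElem_cons (by omega)]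
      have hget0 : PySem.List.pyGetD ks 0 0 = seen[n - K]'(by omega) := by
        rw [hhead]; exact PySem.List.pyGetD_zero_cons _ _ _
      by_cases hgt : s > PySem.List.pyGetD ks 0 0
      · -- replace the minimum
        have hglt : seen[n - K]'(by omega) < s := by rw [hget0] at hgt; exact hgt
        have hset : PySem.List.pySetD ks 0 s = s :: seen.drop (n - K + 1) := by
          rw [hhead, PySem.List.pySetD_of_nonneg _ s (by omega)]
          rfl
        have htails : (seen.drop (n - K + 1)).Pairwise (· ≤ ·) := List.Pairwise.drop hs
        have hksA : PySem.List.sorted (PySem.List.pySetD ks 0 s) (fun x => x) false =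
            ins s (seen.drop (n - K + 1)) := by
          rw [hset]; exact sortedA_cons s _ htails
        have hdropg : (ins s seen).drop (n + 1 - K) = ins s (seen.drop (n - K + 1)) := by
          have := ins_drop_gt s seen hs (n - K) (by omega) hglt
          have he : n + 1 - K = (n - K) + 1 := by omega
          rw [he]; exact this
        simp only [List.foldl_cons, solutionStep, solutionAltStep, if_neg hcond, if_pos hgt,
          hins, hksA]
        have hEA : PySem.List.pyGetD (ins s (seen.drop (n - K + 1))) 0 0 =
            PySem.List.pyGetD (ins s seen) (-(min k (((ins s seen).length : Nat) : Int))) 0 := by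
          rw [heB, ← hdropg, PySem.List.pyGetD_zero,
            List.getD_eq_getElem _ _ (by rw [List.length_drop, hlen']; omega), List.getElem_drop]
          simp
        rw [hEA]
        exact ih _ _ _ hs' (by rw [hlen', hdropg])
      · -- keep the buffer
        have hle : s ≤ seen[n - K]'(by omega) := by rw [hget0] at hgt; omega
        have hdropl : (ins s seen).drop (n + 1 - K) = seen.drop (n - K) := by
          have := ins_drop_le s seen hs (n - K) (by omega) hle
          have he : n + 1 - K = (n - K) + 1 := by omega
          rw [he]; exact this
        simp only [List.foldl_cons, solutionStep, solutionAltStep, if_neg hcond, if_neg hgt,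
          hins]
        have hEA : PySem.List.pyGetD ks 0 0 =
            PySem.List.pyGetD (ins s seen) (-(min k (((ins s seen).length : Nat) : Int))) 0 := by
          rw [heB, hget0]
          have h2 : ((ins s seen).drop (n + 1 - K))[0]'(by rw [List.length_drop, hlen']; omega) =
              (seen.drop (n - K))[0]'(by rw [List.length_drop]; omega) :=
            List.getElem_of_eq hdropl (by rw [List.length_drop, hlen']; omega)
          simp only [List.getElem_drop] at h2
          simpa using h2.symm
        rw [hEA]
        exact ih _ _ _ hs' (by rw [hlen', hdropl, hks])

-- ===== VERDICT (by name: the statement is the Claim_ definition above) =====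
theorem solution_spec : Claim_equal_solution := by
  unfold Claim_equal_solution Spec_solution
  intro k score _ hpre
  rcases hpre with hk | hnil
  · unfold solution solution_alt
    exact loop_eq k hk score [] [] [] List.Pairwise.nil (by simp)
  · subst hnil; rfl
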